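-- pv_equiv track=rewrite | github.com/xiyiwang/leetcode-challenge-solutions | 2021-05/2021-05-13-ambiguousCoordinates.py | ambiguousCoordinates
-- ===== SOURCE A (Python) =====
-- from itertools import product
--
-- def ambiguousCoordinates(s: str) -> list:
--     def make(frag):
--         N = len(frag)
--         for d in range(1, N+1):
--             left = frag[:d]
--             right = frag[d:]
--             if ((not left.startswith("0") or left == "0") and (not right.endswith("0"))):
--                 yield left + ("." if d != N else "") + right
--
--     s = s[1:-1]
--     return ["({}, {})".format(*cand) for i in range(1, len(s)) for cand in product(make(s[:i]), make(s[i:]))]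
-- ===== SOURCE B (Python) =====
-- def ambiguousCoordinates(s: str) -> list:
--     def dots(frag):
--         # all '.'-insertions of frag whose fractional part has no trailing zero,
--         # built by recursion on the first character (no leading-zero rule here)
--         if len(frag) < 2:
--             return []
--         c, rest = frag[0], frag[1:]
--         head = [c + "." + rest] if rest[-1] != "0" else []
--         return head + [c + x for x in dots(rest)]
--
--     def make(frag):
--         if frag == "0":
--             return ["0"]
--         if frag.startswith("0"):
--             # leading zero: only '0.xxx', and only when there is no trailing zero
--             return [] if frag.endswith("0") else ["0." + frag[1:]]
--         return dots(frag) + [frag]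
--
--     t = s[1:-1]
--     res = []
--     for i in range(1, len(t)):
--         for left in make(t[:i]):
--             for right in make(t[i:]):
--                 res.append("({}, {})".format(left, right))
--     return res
-- ===== Notes on version B (the rewrite author's own statement) =====
-- stated objective: alternative
-- what changed: The per-fragment number generator no longer scans split positions: a head-recursive dots() builds all decimal insertions by prepending the first character to the tail's insertions, make() handles the leading-zero cases by early-return branches, and the outer comprehension+product becomes explicit nested append loops.
import Mathlib
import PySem

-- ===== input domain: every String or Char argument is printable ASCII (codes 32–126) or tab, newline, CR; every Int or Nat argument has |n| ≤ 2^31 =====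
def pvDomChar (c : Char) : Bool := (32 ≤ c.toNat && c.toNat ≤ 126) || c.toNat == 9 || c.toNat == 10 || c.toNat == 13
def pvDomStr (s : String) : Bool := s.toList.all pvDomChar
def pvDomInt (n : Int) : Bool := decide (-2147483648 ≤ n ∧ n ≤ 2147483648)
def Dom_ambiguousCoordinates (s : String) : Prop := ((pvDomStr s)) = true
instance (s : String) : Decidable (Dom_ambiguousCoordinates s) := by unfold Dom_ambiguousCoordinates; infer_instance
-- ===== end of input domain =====

-- B replaces A's split-position generator by a head-recursive builder: dots(frag) recursively
-- prepends the first character to the dot-insertions of the tail, and make() decides the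
-- leading-zero cases by direct branches (alternative decomposition, same cost).


-- ===== PORT A =====
-- make(frag): generator scanning every split position d, ported as a foldl accumulating the yields
def pvMakeA (frag : List Char) : List (List Char) :=
  (PySem.List.pyRange 1 ((frag.length : Int) + 1) 1).foldl (fun acc d =>
    if ((!(PySem.Chars.startswith (PySem.List.slice frag none (some d)) ['0']) ||
         PySem.List.slice frag none (some d) == ['0']) &&
        !(PySem.Chars.endswith (PySem.List.slice frag (some d) none) ['0'])) then
      acc ++ [PySem.List.slice frag none (some d) ++
              (if d != (frag.length : Int) then ['.'] else []) ++
              PySem.List.slice frag (some d) none]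
    else acc) []

-- list comprehension over i and product(make(s[:i]), make(s[i:]))
def ambiguousCoordinates (s : String) : List String :=
  let t := PySem.List.slice s.toList (some 1) (some (-1))
  (PySem.List.pyRange 1 (t.length : Int) 1).flatMap (fun i =>
    (pvMakeA (PySem.List.slice t none (some i))).flatMap (fun l =>
      (pvMakeA (PySem.List.slice t (some i) none)).map (fun r =>
        String.ofList (['('] ++ l ++ [',', ' '] ++ r ++ [')']))))

-- ===== PORT B =====
-- dots(frag) from Source B: head recursion; rest[-1] != "0" on the nonempty rest is endswith
def pvDots (frag : List Char) : List (List Char) :=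
  match frag with
  | [] => []
  | [_] => []
  | c :: rest =>
    (if !(PySem.Chars.endswith rest ['0']) then [c :: '.' :: rest] else []) ++
    (pvDots rest).map (fun x => c :: x)

-- make(frag) from Source B: early-return branches on the '0' cases, else dots(frag) + integer
def pvMakeB (frag : List Char) : List (List Char) :=
  if frag == ['0'] then [['0']]
  else if PySem.Chars.startswith frag ['0'] then
    (if PySem.Chars.endswith frag ['0'] then []
     else [['0', '.'] ++ PySem.List.slice frag (some 1) none])
  else pvDots frag ++ [frag]

-- explicit triple nested loop with res.append
def ambiguousCoordinates_alt (s : String) : List String :=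
  let t := PySem.List.slice s.toList (some 1) (some (-1))
  (PySem.List.pyRange 1 (t.length : Int) 1).foldl (fun acc i =>
    (pvMakeB (PySem.List.slice t none (some i))).foldl (fun acc2 l =>
      (pvMakeB (PySem.List.slice t (some i) none)).foldl (fun acc3 r =>
        acc3 ++ [String.ofList (['('] ++ l ++ [',', ' '] ++ r ++ [')'])]) acc2) acc) []

-- ===== PRECONDITION & SPEC =====
def Spec_ambiguousCoordinates (s : String) (out : List String) : Prop := out = ambiguousCoordinates_alt s
instance (s : String) (out : List String) : Decidable (Spec_ambiguousCoordinates s out) := by unfold Spec_ambiguousCoordinates; infer_instance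

-- ===== CLAIM =====
def Claim_equal_ambiguousCoordinates : Prop := ∀ (s : String), Dom_ambiguousCoordinates s → Spec_ambiguousCoordinates s (ambiguousCoordinates s)

-- ===== LEMMAS AND PROOFS =====

-- A's yield condition and yielded value at split position d, as standalone functions
def pvC (frag : List Char) (d : Int) : Bool :=
  (!(PySem.Chars.startswith (PySem.List.slice frag none (some d)) ['0']) ||
   PySem.List.slice frag none (some d) == ['0']) &&
  !(PySem.Chars.endswith (PySem.List.slice frag (some d) none) ['0'])

def pvE (frag : List Char) (d : Int) : List Char :=
  PySem.List.slice frag none (some d) ++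
  (if d != (frag.length : Int) then ['.'] else []) ++
  PySem.List.slice frag (some d) none

-- the common case-analysis normal form both make's are reduced to
def pvCanon (frag : List Char) : List (List Char) :=
  (if !frag.isEmpty && !(PySem.Chars.endswith frag ['0']) then
    (if PySem.Chars.startswith frag ['0'] then
      [['0', '.'] ++ PySem.List.slice frag (some 1) none]
    else
      (PySem.List.pyRange 1 (frag.length : Int) 1).map (fun d =>
        PySem.List.slice frag none (some d) ++ ['.'] ++ PySem.List.slice frag (some d) none))
  else []) ++
  (if frag == ['0'] || (!frag.isEmpty && !(PySem.Chars.startswith frag ['0'])) then [frag] else [])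

lemma makeA_filter (frag : List Char) :
    pvMakeA frag =
      ((PySem.List.pyRange 1 ((frag.length : Int) + 1) 1).filter (pvC frag)).map (pvE frag) := by
  unfold pvMakeA
  show (PySem.List.pyRange 1 ((frag.length : Int) + 1) 1).foldl
      (fun acc d => if pvC frag d then acc ++ [pvE frag d] else acc) [] = _
  rw [PySem.List.foldl_append_if (pvC frag) (pvE frag), List.nil_append]

lemma startswith_cons (c : Char) (l : List Char) :
    PySem.Chars.startswith (c :: l) ['0'] = (c == '0') := by
  rw [Bool.eq_iff_iff]
  simp only [PySem.Chars.startswith_iff, List.cons_prefix_cons, List.nil_prefix, and_true,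
    beq_iff_eq]
  exact eq_comm

lemma endswith_concat (l : List Char) (z : Char) :
    PySem.Chars.endswith (l ++ [z]) ['0'] = (z == '0') := by
  rw [Bool.eq_iff_iff]
  simp only [PySem.Chars.endswith_iff, beq_iff_eq]
  constructor
  · rintro ⟨t, ht⟩
    simp only [← List.concat_eq_append, List.concat_inj] at ht
    exact ht.2.symm
  · rintro rfl; exact ⟨l, rfl⟩

lemma endswith_nil : PySem.Chars.endswith [] ['0'] = false := by decide

lemma endswith_cons (c : Char) (rest : List Char) (h : rest ≠ []) :
    PySem.Chars.endswith (c :: rest) ['0'] = PySem.Chars.endswith rest ['0'] := by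
  rw [Bool.eq_iff_iff]
  simp only [PySem.Chars.endswith_iff]
  rw [List.suffix_cons_iff]
  constructor
  · rintro (h1 | h1)
    · exact absurd (by simpa using congrArg List.tail h1) h
    · exact h1
  · exact Or.inr

lemma take_head (h : Char) (l : List Char) (k : Nat) (hk : 1 ≤ k) :
    (h :: l).take k = h :: l.take (k - 1) := by
  obtain ⟨m, rfl⟩ : ∃ m, k = m + 1 := ⟨k - 1, by omega⟩
  simp

lemma pvC_eval (ys : List Char) (z : Char) (k : Nat) (hk : k ≤ ys.length) :
    pvC (ys ++ [z]) (k : Int) =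
      ((!(PySem.Chars.startswith ((ys ++ [z]).take k) ['0']) ||
        (ys ++ [z]).take k == ['0']) && !(z == '0')) := by
  unfold pvC
  rw [PySem.List.slice_to_natCast, PySem.List.slice_from_natCast,
      List.drop_append_of_le_length (by simpa using hk), endswith_concat]

lemma pvE_eval (frag : List Char) (k : Nat) :
    pvE frag (k : Int) =
      frag.take k ++ (if ((k : Int) != (frag.length : Int)) then ['.'] else []) ++ frag.drop k := by
  unfold pvE
  rw [PySem.List.slice_to_natCast, PySem.List.slice_from_natCast]

lemma makeA_canon (frag : List Char) : pvMakeA frag = pvCanon frag := by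
  induction frag using List.reverseRecOn with
  | nil => rfl
  | append_singleton ys z _ =>
    rw [makeA_filter]
    have hne : (ys ++ [z]).isEmpty = false := by simp
    have hlen : (((ys ++ [z]).length : Nat) : Int) = (ys.length : Int) + 1 := by simp
    rw [hlen, PySem.List.pyRange_one_succ_right (by omega), List.filter_append, List.map_append]
    -- the last split position d = len(frag) yields the integer form
    have hint : (List.filter (pvC (ys ++ [z])) [((ys.length : Int) + 1)]).map (pvE (ys ++ [z])) =
        (if (ys ++ [z]) == ['0'] ||
            (!(ys ++ [z]).isEmpty && !(PySem.Chars.startswith (ys ++ [z]) ['0'])) then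
          [ys ++ [z]] else []) := by
      have hcast : ((ys.length : Int) + 1) = (((ys ++ [z]).length : Nat) : Int) := hlen.symm
      have hC : pvC (ys ++ [z]) ((ys.length : Int) + 1) =
          (!(PySem.Chars.startswith (ys ++ [z]) ['0']) || (ys ++ [z]) == ['0']) := by
        unfold pvC
        rw [hcast, PySem.List.slice_to_natCast, PySem.List.slice_from_natCast,
            List.take_length, List.drop_length]
        simp [endswith_nil]
      have hE : pvE (ys ++ [z]) ((ys.length : Int) + 1) = ys ++ [z] := by
        unfold pvE
        rw [hcast, PySem.List.slice_to_natCast, PySem.List.slice_from_natCast,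
            List.take_length, List.drop_length]
        simp
      rw [List.filter_singleton, hC]
      cases hsw : PySem.Chars.startswith (ys ++ [z]) ['0'] <;>
        cases heq : (ys ++ [z]) == ['0'] <;>
          simp [hE, hne]
    -- the split positions d < len(frag) yield the decimal forms
    have hdec : (List.filter (pvC (ys ++ [z])) (PySem.List.pyRange 1 ((ys.length : Int) + 1) 1)).map
          (pvE (ys ++ [z])) =
        (if !(ys ++ [z]).isEmpty && !(PySem.Chars.endswith (ys ++ [z]) ['0']) then
          (if PySem.Chars.startswith (ys ++ [z]) ['0'] then
            [['0', '.'] ++ PySem.List.slice (ys ++ [z]) (some 1) none]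
          else
            (PySem.List.pyRange 1 (((ys ++ [z]).length : Int)) 1).map (fun d =>
              PySem.List.slice (ys ++ [z]) none (some d) ++ ['.'] ++
              PySem.List.slice (ys ++ [z]) (some d) none))
        else []) := by
      cases hz : (z == '0') with
      | true =>
        -- frag ends with '0': no decimal form on either side
        have hz' : z = '0' := by simpa using hz
        have hfilter : List.filter (pvC (ys ++ [z]))
            (PySem.List.pyRange 1 ((ys.length : Int) + 1) 1) = [] := by
          apply List.filter_eq_nil_iff.mpr
          intro d hd
          rw [PySem.List.mem_pyRange_one] at hd
          obtain ⟨k, rfl⟩ : ∃ k : Nat, d = (k : Int) :=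
            ⟨d.toNat, (Int.toNat_of_nonneg (by omega)).symm⟩
          rw [pvC_eval ys z k (by omega), hz']
          simp
        rw [hfilter]
        simp [endswith_concat, hz']
      | false =>
        have hewf : PySem.Chars.endswith (ys ++ [z]) ['0'] = false := by
          rw [endswith_concat]; exact hz
        rcases ys with _ | ⟨h, tl⟩
        · -- frag is a single non-'0' character: no decimal form on either side
          have hswf : PySem.Chars.startswith ([] ++ [z]) ['0'] = false := by
            rw [List.nil_append, startswith_cons]; exact hz
          have hb : ((([] : List Char).length : Int) + 1) = 1 := by simp
          rw [hb, PySem.List.pyRange_one_eq_nil (by omega), List.filter_nil, List.map_nil,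
              hewf, hswf]
          have hb2 : ((([] ++ [z] : List Char)).length : Int) = 1 := by simp
          rw [hb2, PySem.List.pyRange_one_eq_nil (by omega)]
          simp
        · cases hh : (h == '0') with
          | true =>
            -- leading zero: only the split right after it survives
            have hh' : h = '0' := by simpa using hh
            have hsw : PySem.Chars.startswith ((h :: tl) ++ [z]) ['0'] = true := by
              rw [List.cons_append, startswith_cons]; exact hh
            have h1 : ((1 : Int)) = ((1 : Nat) : Int) := by simp
            have hC1 : pvC ((h :: tl) ++ [z]) 1 = true := by
              rw [h1, pvC_eval (h :: tl) z 1 (by simp), hz]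
              simp [hh']
            have hrest : List.filter (pvC ((h :: tl) ++ [z]))
                (PySem.List.pyRange (1 + 1) (((h :: tl).length : Int) + 1) 1) = [] := by
              apply List.filter_eq_nil_iff.mpr
              intro d hd
              rw [PySem.List.mem_pyRange_one] at hd
              simp only [List.length_cons] at hd
              obtain ⟨k, rfl⟩ : ∃ k : Nat, d = (k : Int) :=
                ⟨d.toNat, (Int.toNat_of_nonneg (by omega)).symm⟩
              have hk2 : 2 ≤ k := by omega
              have hkle : k ≤ (h :: tl).length := by simp only [List.length_cons]; omega
              rw [pvC_eval (h :: tl) z k hkle, List.cons_append,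
                  take_head h (tl ++ [z]) k (by omega), startswith_cons, hh]
              have htne : (tl ++ [z]).take (k - 1) ≠ [] := by
                intro hcontra
                have hlc := congrArg List.length hcontra
                simp only [List.length_take, List.length_append, List.length_cons,
                  List.length_nil] at hlc
                omega
              have hbe : ('0' :: (tl ++ [z]).take (k - 1) == ['0']) = false := by
                rw [beq_eq_false_iff_ne]
                intro hc
                apply htne
                simpa using hc
              rw [hh', hbe]
              simp
            have hE1 : pvE ((h :: tl) ++ [z]) 1 = ['0', '.'] ++ (tl ++ [z]) := by
              rw [h1, pvE_eval]
              have hb : (((1 : Nat) : Int) != ((((h :: tl) ++ [z]).length : Nat) : Int)) = true := by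
                rw [bne_iff_ne]
                simp only [List.length_append, List.length_cons, List.length_nil]
                push_cast
                omega
              rw [hb]
              simp [List.cons_append, hh']
            rw [PySem.List.pyRange_one_cons
                  (by simp only [List.length_cons]; push_cast; omega),
                List.filter_cons_of_pos hC1, hrest, List.map_cons, List.map_nil, hE1,
                hewf, hsw, hne, PySem.List.slice_from_one]
            simp [List.cons_append]
          | false =>
            -- no leading zero, no trailing zero: every split position survives
            have hsw : PySem.Chars.startswith ((h :: tl) ++ [z]) ['0'] = false := by
              rw [List.cons_append, startswith_cons]; exact hh
            have hfilter : List.filter (pvC ((h :: tl) ++ [z]))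
                  (PySem.List.pyRange 1 (((h :: tl).length : Int) + 1) 1) =
                PySem.List.pyRange 1 (((h :: tl).length : Int) + 1) 1 := by
              apply List.filter_eq_self.mpr
              intro d hd
              rw [PySem.List.mem_pyRange_one] at hd
              simp only [List.length_cons] at hd
              obtain ⟨k, rfl⟩ : ∃ k : Nat, d = (k : Int) :=
                ⟨d.toNat, (Int.toNat_of_nonneg (by omega)).symm⟩
              have hk1 : 1 ≤ k := by omega
              have hkle : k ≤ (h :: tl).length := by simp only [List.length_cons]; omega
              rw [pvC_eval (h :: tl) z k hkle, List.cons_append,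
                  take_head h (tl ++ [z]) k hk1, startswith_cons, hh, hz]
              simp
            rw [hfilter, hewf, hsw, hne, hlen]
            simp only [Bool.not_false, Bool.and_self, if_true, Bool.false_eq_true, if_false]
            apply List.map_congr_left
            intro d hd
            rw [PySem.List.mem_pyRange_one] at hd
            unfold pvE
            have hdne : (d != ((((h :: tl) ++ [z]).length : Nat) : Int)) = true := by
              rw [bne_iff_ne]
              simp only [List.length_append, List.length_cons, List.length_nil] at hd ⊢
              push_cast at hd ⊢
              omega
            rw [hdne]
            simp
    rw [hdec, hint]
    rfl

-- dots on a fragment ending in '0' is empty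
lemma dots_ends_zero (frag : List Char) (h : PySem.Chars.endswith frag ['0'] = true) :
    pvDots frag = [] := by
  induction frag with
  | nil => rfl
  | cons c rest ih =>
    rcases rest with _ | ⟨c2, rest'⟩
    · rfl
    · have hr : PySem.Chars.endswith (c2 :: rest') ['0'] = true := by
        rwa [endswith_cons c _ (by simp)] at h
      show (if !(PySem.Chars.endswith (c2 :: rest') ['0']) then [c :: '.' :: c2 :: rest'] else [])
          ++ (pvDots (c2 :: rest')).map (fun x => c :: x) = []
      rw [hr, ih hr]
      simp

-- dots on a fragment not ending in '0' lists every split position in order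
lemma dots_spec_nat (frag : List Char) (h : PySem.Chars.endswith frag ['0'] = false) :
    pvDots frag = (List.range (frag.length - 1)).map
      (fun k => frag.take (k + 1) ++ '.' :: frag.drop (k + 1)) := by
  induction frag with
  | nil => rfl
  | cons c rest ih =>
    rcases rest with _ | ⟨c2, rest'⟩
    · rfl
    · have hr : PySem.Chars.endswith (c2 :: rest') ['0'] = false := by
        rwa [endswith_cons c _ (by simp)] at h
      show (if !(PySem.Chars.endswith (c2 :: rest') ['0']) then [c :: '.' :: c2 :: rest'] else [])
          ++ (pvDots (c2 :: rest')).map (fun x => c :: x) = _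
      rw [hr, ih hr]
      simp only [Bool.not_false, if_true, List.length_cons, Nat.add_sub_cancel,
        List.range_succ_eq_map, List.map_cons, List.map_map, List.take_succ_cons,
        List.drop_succ_cons, List.take_zero, List.drop_zero]
      rfl

lemma dots_spec (frag : List Char) (h : PySem.Chars.endswith frag ['0'] = false) :
    pvDots frag = (PySem.List.pyRange 1 (frag.length : Int) 1).map (fun d =>
      PySem.List.slice frag none (some d) ++ ['.'] ++ PySem.List.slice frag (some d) none) := by
  rw [dots_spec_nat frag h, PySem.List.pyRange_one, List.map_map]
  have hn : ((frag.length : Int) - 1).toNat = frag.length - 1 := by omega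
  rw [hn]
  apply List.map_congr_left
  intro k _
  show frag.take (k + 1) ++ '.' :: frag.drop (k + 1) = _
  have hcast : (1 + (k : Int)) = (((k + 1 : Nat)) : Int) := by push_cast; ring
  simp only [Function.comp, hcast, PySem.List.slice_to_natCast, PySem.List.slice_from_natCast]
  simp

lemma canon_eq_makeB (frag : List Char) (h : frag ≠ []) : pvCanon frag = pvMakeB frag := by
  unfold pvCanon pvMakeB
  have hne : frag.isEmpty = false := by simpa using h
  cases hfz : (frag == ['0']) with
  | true =>
    have : frag = ['0'] := by simpa using hfz
    subst this
    decide
  | false =>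
    cases hsw : PySem.Chars.startswith frag ['0'] with
    | true =>
      cases hew : PySem.Chars.endswith frag ['0'] <;> simp [hne]
    | false =>
      cases hew : PySem.Chars.endswith frag ['0'] with
      | true => rw [dots_ends_zero frag hew]; simp [hne]
      | false => rw [dots_spec frag hew]; simp [hne]

lemma makeA_eq_makeB (frag : List Char) (h : frag ≠ []) : pvMakeA frag = pvMakeB frag := by
  rw [makeA_canon, canon_eq_makeB frag h]

-- ===== VERDICT (by name: the statement is the Claim_ definition above) =====
set_option maxRecDepth 8192 in
theorem ambiguousCoordinates_spec : Claim_equal_ambiguousCoordinates := by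
  intro s _
  unfold Spec_ambiguousCoordinates ambiguousCoordinates ambiguousCoordinates_alt
  simp only [PySem.List.foldl_append_singleton_eq_map, PySem.List.foldl_append_eq_flatMap,
    List.nil_append]
  apply List.flatMap_congr
  intro i hi
  rw [PySem.List.mem_pyRange_one] at hi
  obtain ⟨k, rfl⟩ : ∃ k : Nat, i = (k : Int) :=
    ⟨i.toNat, (Int.toNat_of_nonneg (by omega)).symm⟩
  have hk1 : 1 ≤ k := by omega
  have hk2 : k < (PySem.List.slice s.toList (some 1) (some (-1))).length := by
    exact_mod_cast hi.2
  have hL : PySem.List.slice (PySem.List.slice s.toList (some 1) (some (-1))) none (some (k : Int)) ≠ [] := by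
    rw [PySem.List.slice_to_natCast, Ne, List.take_eq_nil_iff]
    push Not
    exact ⟨by omega, by intro hc; rw [hc] at hk2; simp at hk2⟩
  have hR : PySem.List.slice (PySem.List.slice s.toList (some 1) (some (-1))) (some (k : Int)) none ≠ [] := by
    rw [PySem.List.slice_from_natCast, Ne, List.drop_eq_nil_iff]
    omega
  rw [makeA_eq_makeB _ hL, makeA_eq_makeB _ hR]
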